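-- pv_equiv track=rewrite | github.com/yba01/python | Procedural/intermediate/phone_number_validator.py | get_number_by_operator
-- ===== SOURCE A (Python) =====
-- def add_op(number, op) :
-- 	for deb in op :
-- 		if number==deb :
-- 			return 1
-- 	return 0
--
-- def get_number_by_operator(valid) :
-- 	orange = tigo = expresso = promobile = 0
-- 	for number in valid :
-- 		orange += add_op(number[:2], ["77", "78"])
-- 		tigo += add_op(number[:2], ["76"])
-- 		expresso += add_op(number[:2], ["70"])
-- 		promobile += add_op(number[:2], ["75"])
-- 		# if number[:2]=='77' or number[:2]=='78' :
-- 		# 	orange += 1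
-- 		# elif number[:2]=='76' :
-- 		# 	tigo += 1
-- 		# elif number[:2]=='70' :
-- 		# 	expresso += 1
-- 		# else:
-- 		# 	promobile += 1
-- 	return orange, tigo, expresso, promobile
-- ===== SOURCE B (Python) =====
-- def get_number_by_operator(valid):
--     c = {}
--     for number in valid:
--         p = number[:2]
--         c[p] = c.get(p, 0) + 1
--     return (c.get("77", 0) + c.get("78", 0), c.get("76", 0), c.get("70", 0), c.get("75", 0))
-- ===== Notes on version B (the rewrite author's own statement) =====
-- stated objective: idiomatic
-- what changed: Replaces four incremental counters with per-element membership scans (add_op) by a single frequency dictionary of two-character prefixes built in one pass, with the four fixed keys read once at the end.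
import Mathlib
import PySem

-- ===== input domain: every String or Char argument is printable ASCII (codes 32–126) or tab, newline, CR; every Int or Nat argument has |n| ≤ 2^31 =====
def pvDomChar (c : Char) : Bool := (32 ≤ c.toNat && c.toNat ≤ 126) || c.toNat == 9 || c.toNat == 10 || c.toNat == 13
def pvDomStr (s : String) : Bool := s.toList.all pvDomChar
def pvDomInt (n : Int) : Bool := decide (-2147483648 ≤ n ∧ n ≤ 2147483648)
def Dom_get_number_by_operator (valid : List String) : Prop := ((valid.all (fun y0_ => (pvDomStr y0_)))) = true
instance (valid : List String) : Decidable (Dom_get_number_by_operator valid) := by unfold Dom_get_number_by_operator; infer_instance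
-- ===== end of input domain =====

-- B replaces four per-element membership scans by one prefix-frequency dictionary read at fixed keys (idiomatic; return value only, no mutation involved).

-- ===== PORT A =====
def add_op (number : String) (op : List String) : Int :=
  match op with
  | [] => 0
  | deb :: rest => if number == deb then 1 else add_op number rest

def get_number_by_operator (valid : List String) : Int × Int × Int × Int :=
  let s := valid.foldl (fun s number =>
    (s.1 + add_op (PySem.Str.slice number none (some 2)) ["77", "78"],
     s.2.1 + add_op (PySem.Str.slice number none (some 2)) ["76"],
     s.2.2.1 + add_op (PySem.Str.slice number none (some 2)) ["70"],
     s.2.2.2 + add_op (PySem.Str.slice number none (some 2)) ["75"])) (0, 0, 0, 0)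
  s

-- ===== PORT B =====
def get_number_by_operator_alt (valid : List String) : Int × Int × Int × Int :=
  let c : PySem.Dict String Int :=
    valid.foldl (fun c number => c.modify (PySem.Str.slice number none (some 2)) 0 (· + 1)) PySem.Dict.empty
  (c.getD "77" 0 + c.getD "78" 0, c.getD "76" 0, c.getD "70" 0, c.getD "75" 0)

-- ===== PRECONDITION & SPEC =====
def Spec_get_number_by_operator (valid : List String) (out : Int × Int × Int × Int) : Prop := out = get_number_by_operator_alt valid
instance (valid : List String) (out : Int × Int × Int × Int) : Decidable (Spec_get_number_by_operator valid out) := by unfold Spec_get_number_by_operator; infer_instance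

-- ===== CLAIM (what is proved, stated in full; the proofs are below) =====
def Claim_equal_get_number_by_operator : Prop := ∀ (valid : List String), Dom_get_number_by_operator valid → Spec_get_number_by_operator valid (get_number_by_operator valid)

-- ===== LEMMAS AND PROOFS =====

theorem loopA_eq (l : List String) (s : Int × Int × Int × Int) :
    l.foldl (fun s number =>
      (s.1 + add_op (PySem.Str.slice number none (some 2)) ["77", "78"],
       s.2.1 + add_op (PySem.Str.slice number none (some 2)) ["76"],
       s.2.2.1 + add_op (PySem.Str.slice number none (some 2)) ["70"],
       s.2.2.2 + add_op (PySem.Str.slice number none (some 2)) ["75"])) s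
    = (s.1 + ((l.map (fun n => PySem.Str.slice n none (some 2))).count "77" +
              (l.map (fun n => PySem.Str.slice n none (some 2))).count "78" : Int),
       s.2.1 + ((l.map (fun n => PySem.Str.slice n none (some 2))).count "76" : Int),
       s.2.2.1 + ((l.map (fun n => PySem.Str.slice n none (some 2))).count "70" : Int),
       s.2.2.2 + ((l.map (fun n => PySem.Str.slice n none (some 2))).count "75" : Int)) := by
  induction l generalizing s with
  | nil => simp
  | cons a l ih =>
    rw [List.foldl_cons, ih]
    simp only [List.map_cons, List.count_cons, add_op, beq_iff_eq]
    split_ifs with h1 h2 h3 h4 h5 <;> simp_all <;> omega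

-- B's dictionary lookup is the count of the key among the prefixes
theorem dictB_getD (l : List String) (v : String) :
    ((l.foldl (fun c number => c.modify (PySem.Str.slice number none (some 2)) 0 (· + 1))
        (PySem.Dict.empty : PySem.Dict String Int)).getD v 0)
    = ((l.map (fun n => PySem.Str.slice n none (some 2))).count v : Int) := by
  rw [← List.foldl_map (f := fun (n : String) => PySem.Str.slice n none (some 2))
        (g := fun (d : PySem.Dict String Int) x => PySem.Dict.modify d x 0 (· + 1))
        (l := l) (init := (PySem.Dict.empty : PySem.Dict String Int))]
  rw [PySem.Dict.getD_foldl_modify_add_one]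
  simp [PySem.Dict.empty, PySem.Dict.getD, PySem.Dict.get?]

-- ===== VERDICT (by name: the statement is the Claim_ definition above) =====
theorem get_number_by_operator_spec : Claim_equal_get_number_by_operator := by
  intro valid _
  unfold Spec_get_number_by_operator get_number_by_operator get_number_by_operator_alt
  simp only [loopA_eq, dictB_getD]
  simp
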